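-- pv_equiv track=rewrite | github.com/natiBirhauz/Community-Detection-Algorithms | LouvianBigDataTest.py | merge_small_communities
-- ===== SOURCE A (Python) =====
-- from collections import  defaultdict
--
-- def merge_small_communities(partition, threshold=3):
--     community_counts = defaultdict(int)
--     for node, community in partition.items():
--         community_counts[community] += 1
--
--     small_communities = [community for community, count in community_counts.items() if count < threshold]
--     new_community_id = max(partition.values()) + 1
--     merged_community_id = new_community_id
--     for node, community in partition.items():
--         if community in small_communities:
--             partition[node] = new_community_id
--
--     # מיפוי מחדש של החלוקה לאחר איחוד הקהילות הקטנות
--     unique_communities = sorted(set(partition.values()))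
--     community_mapping = {old: new for new, old in enumerate(unique_communities, 1)}
--     remapped_partition = {node: community_mapping[community] for node, community in partition.items()}
--
--     return remapped_partition, merged_community_id
-- ===== SOURCE B (Python) =====
-- def merge_small_communities(partition, threshold=3):
--     # Sort the community values once; a run-length sweep over the sorted list both
--     # counts each community and assigns final labels 1..k to the big runs in order;
--     # small communities fall through to the default label k+1. No counter dict,
--     # no set, no rewrite pass; the input dict is NOT mutated (return value only).
--     vals = sorted(partition.values())
--     new_id = vals[-1] + 1
--     label_of = {}
--     nxt = 1
--     i = 0
--     n = len(vals)
--     while i < n: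
--         j = i
--         while j < n and vals[j] == vals[i]:
--             j += 1
--         if j - i >= threshold:
--             label_of[vals[i]] = nxt
--             nxt += 1
--         i = j
--     return {node: label_of.get(c, nxt) for node, c in partition.items()}, new_id
-- ===== Notes on version B (the rewrite author's own statement) =====
-- stated objective: alternative
-- what changed: B sorts the community values once and does a run-length sweep over the sorted list: each maximal run is both the count of its community and, if big enough, gets the next label 1..k directly; small communities fall through to the default label k+1 in the final lookup pass, replacing A's counter dict, small-community list, in-place rewrite pass and set/sort/enumerate remapping pipeline (B does not mutate the input dict).
import Mathlib
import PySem

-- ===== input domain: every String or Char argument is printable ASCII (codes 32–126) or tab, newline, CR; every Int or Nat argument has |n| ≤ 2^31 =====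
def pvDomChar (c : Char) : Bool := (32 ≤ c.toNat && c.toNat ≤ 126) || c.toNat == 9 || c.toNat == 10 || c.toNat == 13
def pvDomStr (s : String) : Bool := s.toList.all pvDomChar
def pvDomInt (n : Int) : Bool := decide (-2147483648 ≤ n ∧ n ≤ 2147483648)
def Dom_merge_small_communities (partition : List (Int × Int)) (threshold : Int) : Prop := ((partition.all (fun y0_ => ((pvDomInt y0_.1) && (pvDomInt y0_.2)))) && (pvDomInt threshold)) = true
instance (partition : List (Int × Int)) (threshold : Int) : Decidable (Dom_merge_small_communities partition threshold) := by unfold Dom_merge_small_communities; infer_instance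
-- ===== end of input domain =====

-- B replaces A's counter-dict + small-list + rewrite pass + set/sort/enumerate pipeline by ONE sort of the
-- values and a run-length sweep over the sorted list that assigns final labels directly (small runs fall
-- through to the default label). A mutates its dict argument in place; B does not: the equivalence proved
-- here is about the RETURN value only.

-- ===== PORT A =====
-- A's dict parameter arrives as an association list; both ports read it through dict(pairs) = PySem.Dict.ofList.
def pvA_counts (d : PySem.Dict Int Int) : PySem.Dict Int Int :=
  d.items.foldl (fun c p => c.modify p.2 0 (· + 1)) PySem.Dict.empty

def pvA_small (d : PySem.Dict Int Int) (th : Int) : List Int :=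
  ((pvA_counts d).items.filter (fun p => p.2 < th)).map (·.1)

def pvA_newId (d : PySem.Dict Int Int) : Int :=
  (PySem.List.max? d.values (fun x => x)).getD 0 + 1   -- max(partition.values()) raises on empty: excluded by Pre_

def pvA_d2 (d : PySem.Dict Int Int) (th : Int) : PySem.Dict Int Int :=
  d.items.foldl (fun acc p => if (pvA_small d th).contains p.2 then acc.insert p.1 (pvA_newId d) else acc) d

def pvA_unique (d : PySem.Dict Int Int) (th : Int) : List Int :=
  PySem.List.sorted (PySem.Set.ofList (pvA_d2 d th).values) (fun x => x) false

def pvA_mapping (d : PySem.Dict Int Int) (th : Int) : PySem.Dict Int Int :=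
  (PySem.List.enumerate (pvA_unique d th) 1).foldl (fun m p => m.insert p.2 p.1) PySem.Dict.empty

def merge_small_communities (partition : List (Int × Int)) (threshold : Int) : (List (Int × Int)) × Int :=
  let d := PySem.Dict.ofList partition
  (((pvA_d2 d threshold).items.foldl
      (fun m p => m.insert p.1 ((pvA_mapping d threshold).getD p.2 0)) PySem.Dict.empty).items,
   pvA_newId d)

-- ===== PORT B =====
-- Source B's outer while loop: each step consumes one maximal run of equal values (the inner 'while j' scan
-- is the takeWhile/dropWhile split), assigns the next label if the run is big, then continues at j.
def pvB_sweep (th : Int) : List Int → Int → PySem.Dict Int Int → PySem.Dict Int Int × Int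
  | [], nxt, m => (m, nxt)
  | v :: rest, nxt, m =>
      let run := rest.takeWhile (fun x => x == v)
      let tail := rest.dropWhile (fun x => x == v)
      if th ≤ (1 + run.length : Int) then
        pvB_sweep th tail (nxt + 1) (m.insert v nxt)
      else
        pvB_sweep th tail nxt m
termination_by l => l.length
decreasing_by all_goals exact Nat.lt_succ_of_le (List.length_dropWhile_le _ _)

def merge_small_communities_alt (partition : List (Int × Int)) (threshold : Int) : (List (Int × Int)) × Int :=
  let d := PySem.Dict.ofList partition
  let vals := PySem.List.sorted d.values (fun x => x) false
  let new_id := (PySem.List.pyGet? vals (-1)).getD 0 + 1   -- vals[-1] raises IndexError on empty: excluded by Pre_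
  let sw := pvB_sweep threshold vals 1 PySem.Dict.empty
  ((d.items.foldl (fun m p => m.insert p.1 (sw.1.getD p.2 sw.2)) PySem.Dict.empty).items,
   new_id)

-- ===== PRECONDITION & SPEC =====
-- Pre_ excludes only the empty partition, on which A raises ValueError (max() of an empty sequence).
def Pre_merge_small_communities (partition : List (Int × Int)) (threshold : Int) : Prop := partition ≠ []
instance (partition : List (Int × Int)) (threshold : Int) : Decidable (Pre_merge_small_communities partition threshold) := by unfold Pre_merge_small_communities; infer_instance
def pvWitness_merge_small_communities : (List (Int × Int)) × Int := ([(1, 2)], 3)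
def Spec_merge_small_communities (partition : List (Int × Int)) (threshold : Int) (out : (List (Int × Int)) × Int) : Prop := out = merge_small_communities_alt partition threshold
instance (partition : List (Int × Int)) (threshold : Int) (out : (List (Int × Int)) × Int) : Decidable (Spec_merge_small_communities partition threshold out) := by unfold Spec_merge_small_communities; infer_instance

-- ===== CLAIM (what is proved, stated in full; the proofs are below) =====
def Claim_equal_merge_small_communities : Prop := ∀ (partition : List (Int × Int)) (threshold : Int), Dom_merge_small_communities partition threshold → Pre_merge_small_communities partition threshold → Spec_merge_small_communities partition threshold (merge_small_communities partition threshold)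

-- ===== LEMMAS AND PROOFS =====

-- proof-side: the list of big run heads pvB_sweep labels, in sweep order
def pvBigList (th : Int) : List Int → List Int
  | [] => []
  | v :: rest =>
      if th ≤ (1 + (rest.takeWhile (fun x => x == v)).length : Int) then
        v :: pvBigList th (rest.dropWhile (fun x => x == v))
      else
        pvBigList th (rest.dropWhile (fun x => x == v))
termination_by l => l.length
decreasing_by all_goals exact Nat.lt_succ_of_le (List.length_dropWhile_le _ _)

theorem pv_keys_ofList (l : List (Int × Int)) :
    (PySem.Dict.ofList l).keys = PySem.Set.ofList (l.map Prod.fst) := by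
  have h : PySem.Dict.ofList l = l.foldl (fun d p => d.insert p.1 p.2) PySem.Dict.empty := rfl
  rw [h, PySem.Dict.keys_foldl_insert_key]
  simp [PySem.Set.update_nil_left]

theorem pv_vals_ne (l : List (Int × Int)) (h : l ≠ []) :
    (PySem.Dict.ofList l).values ≠ [] := by
  cases l with
  | nil => exact absurd rfl h
  | cons p t =>
    intro hv
    have h1 : (PySem.Dict.ofList (p :: t)).items = [] := by
      have := hv
      simpa [PySem.Dict.values, List.map_eq_nil_iff] using this
    have h2 : p.1 ∈ (PySem.Dict.ofList (p :: t)).keys := by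
      rw [pv_keys_ofList]
      simp [PySem.Set.mem_ofList]
    rw [show (PySem.Dict.ofList (p :: t)).keys = (PySem.Dict.ofList (p :: t)).items.map (·.1) from rfl, h1] at h2
    simp at h2

theorem pv_counts_eq (d : PySem.Dict Int Int) :
    pvA_counts d = PySem.Dict.counter d.values := by
  unfold pvA_counts
  rw [PySem.Dict.counter_eq_foldl]
  show _ = (d.items.map (·.2)).foldl _ _
  rw [List.foldl_map]

theorem pv_smallA_mem (d : PySem.Dict Int Int) (th y : Int) :
    y ∈ pvA_small d th ↔ y ∈ d.values ∧ d.values.count y < th := by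
  unfold pvA_small
  rw [pv_counts_eq, PySem.Dict.items_counter]
  simp only [List.mem_map, List.mem_filter, PySem.Set.mem_ofList]
  constructor
  · rintro ⟨p, ⟨⟨x, hx, rfl⟩, hlt⟩, rfl⟩
    simp only [decide_eq_true_eq] at hlt
    exact ⟨hx, hlt⟩
  · rintro ⟨hy, hlt⟩
    exact ⟨(y, d.values.count y), ⟨⟨y, hy, rfl⟩, by simpa using hlt⟩, rfl⟩

theorem pv_lt_newId (d : PySem.Dict Int Int) (hne : d.values ≠ []) :
    ∀ w ∈ d.values, w < pvA_newId d := by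
  intro w hw
  unfold pvA_newId
  cases hmax : PySem.List.max? d.values (fun x => x) with
  | none =>
    cases hv : d.values with
    | nil => exact absurd hv hne
    | cons a t' =>
      rw [hv, PySem.List.max?_id_cons] at hmax
      cases hmax
  | some m =>
    have := PySem.List.max?_isMax hmax w hw
    simp only [Option.getD_some]
    omega

theorem pv_foldins_keys (cond : Int × Int → Bool) (v : Int) :
    ∀ (l : List (Int × Int)) (acc : PySem.Dict Int Int),
      (∀ p ∈ l, acc.contains p.1 = true) →
      (l.foldl (fun a p => if cond p then a.insert p.1 v else a) acc).keys = acc.keys := by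
  intro l
  induction l with
  | nil => intro acc _; rfl
  | cons p t ih =>
    intro acc hc
    simp only [List.foldl_cons]
    by_cases hp : cond p
    · rw [if_pos hp]
      have hk : (acc.insert p.1 v).keys = acc.keys :=
        PySem.Dict.keys_insert_of_contains acc v (hc p List.mem_cons_self)
      have hcont : ∀ q ∈ t, (acc.insert p.1 v).contains q.1 = true := by
        intro q hq
        rw [PySem.Dict.contains_insert]
        rw [hc q (List.mem_cons_of_mem _ hq)]
        simp
      rw [ih (acc.insert p.1 v) hcont, hk]
    · rw [if_neg hp]
      exact ih acc (fun q hq => hc q (List.mem_cons_of_mem _ hq))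

theorem pv_foldins_get? (cond : Int × Int → Bool) (v : Int) :
    ∀ (l : List (Int × Int)) (acc : PySem.Dict Int Int) (k : Int), (l.map Prod.fst).Nodup →
      (l.foldl (fun a p => if cond p then a.insert p.1 v else a) acc).get? k =
        if l.any (fun p => p.1 == k && cond p) then some v else acc.get? k := by
  intro l
  induction l with
  | nil => intro acc k _; simp
  | cons p t ih =>
    intro acc k hnd
    simp only [List.map_cons, List.nodup_cons] at hnd
    obtain ⟨hp1, hnd'⟩ := hnd
    simp only [List.foldl_cons, List.any_cons]
    by_cases hc : cond p
    · rw [if_pos hc, ih (acc.insert p.1 v) k hnd']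
      by_cases hk : k = p.1
      · have ht : t.any (fun q => q.1 == k && cond q) = false := by
          rw [List.any_eq_false]
          intro q hq
          simp only [Bool.and_eq_true, beq_iff_eq, not_and]
          intro hqk _
          have hm : q.1 ∈ t.map Prod.fst := List.mem_map_of_mem hq
          rw [hqk, hk] at hm
          exact hp1 hm
        rw [hk] at ht
        simp only [hk]
        simp [ht, PySem.Dict.get?_insert_self, hc]
      · have h1 : (acc.insert p.1 v).get? k = acc.get? k :=
          PySem.Dict.get?_insert_of_ne acc v hk
        have h2 : (p.1 == k) = false := by
          simp only [beq_eq_false_iff_ne, ne_eq]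
          exact fun h => hk h.symm
        rw [h1]
        simp only [h2, Bool.false_and, Bool.false_or]
    · rw [if_neg hc, ih acc k hnd']
      have h2 : ((p.1 == k) && cond p) = false := by simp [hc]
      simp only [h2, Bool.false_or]

theorem pv_d2_items (d : PySem.Dict Int Int) (th : Int) (hnd : d.keys.Nodup) :
    (pvA_d2 d th).items =
      d.items.map (fun p => if (pvA_small d th).contains p.2 then (p.1, pvA_newId d) else p) := by
  have hcont : ∀ p ∈ d.items, d.contains p.1 = true := by
    intro p hp
    rw [PySem.Dict.contains_iff_mem_keys]
    exact List.mem_map_of_mem hp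
  have hk : (pvA_d2 d th).keys = d.keys :=
    pv_foldins_keys (fun p => (pvA_small d th).contains p.2) (pvA_newId d) d.items d hcont
  have hnd2 : (pvA_d2 d th).keys.Nodup := hk ▸ hnd
  have hfst : (d.items.map Prod.fst).Nodup := hnd
  rw [PySem.Dict.items_eq_map_keys (pvA_d2 d th) hnd2 0,
      PySem.Dict.items_eq_map_keys d hnd 0, hk, List.map_map]
  apply List.map_congr_left
  intro k hkm
  have hgetne : d.get? k ≠ none := by
    intro h0
    have h1 := PySem.Dict.get?_eq_none_iff_not_mem_keys (d := d) (k := k)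
    exact h1.mp h0 hkm
  obtain ⟨w, hw⟩ := Option.ne_none_iff_exists'.mp hgetne
  have hwD : d.getD k 0 = w := PySem.Dict.getD_of_get?_eq_some d 0 hw
  have hg := pv_foldins_get? (fun p => (pvA_small d th).contains p.2) (pvA_newId d) d.items d k hfst
  have hany : (d.items.any (fun p => p.1 == k && (pvA_small d th).contains p.2)) =
      (pvA_small d th).contains w := by
    by_cases hcw : (pvA_small d th).contains w
    · rw [hcw, List.any_eq_true]
      exact ⟨(k, w), PySem.Dict.mem_items_of_get?_eq_some d hw,
        by simp only [beq_self_eq_true, Bool.true_and]; exact hcw⟩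
    · have hfalse : (d.items.any fun p => p.1 == k && (pvA_small d th).contains p.2) = false := by
        rw [List.any_eq_false]
        intro p hp
        simp only [Bool.and_eq_true, beq_iff_eq, not_and]
        intro hpk hcp
        have hgp : d.get? p.1 = some p.2 := PySem.Dict.get?_of_mem_items d hp hnd
        rw [hpk, hw] at hgp
        have hpw : p.2 = w := (Option.some.inj hgp).symm
        exact hcw (hpw ▸ hcp)
      rw [hfalse]
      exact ((Bool.not_eq_true _).mp hcw).symm
  have hd2 : (pvA_d2 d th).get? k =
      if (pvA_small d th).contains w then some (pvA_newId d) else d.get? k := by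
    unfold pvA_d2
    rw [hg, hany]
  have hd2D : (pvA_d2 d th).getD k 0 =
      if (pvA_small d th).contains w then pvA_newId d else w := by
    by_cases hcw : (pvA_small d th).contains w
    · rw [if_pos hcw]
      exact PySem.Dict.getD_of_get?_eq_some _ 0 (by rw [hd2, if_pos hcw])
    · rw [if_neg hcw, ← hwD]
      rw [PySem.Dict.getD_eq_get?_getD, PySem.Dict.getD_eq_get?_getD, hd2, if_neg hcw]
  simp only [Function.comp]
  rw [hd2D, hwD]
  by_cases hcw : (pvA_small d th).contains w
  · rw [if_pos hcw, if_pos hcw]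
  · rw [if_neg hcw, if_neg hcw]

theorem pv_d2_values (d : PySem.Dict Int Int) (th : Int) (hnd : d.keys.Nodup) :
    (pvA_d2 d th).values =
      d.values.map (fun w => if (pvA_small d th).contains w then pvA_newId d else w) := by
  rw [show (pvA_d2 d th).values = (pvA_d2 d th).items.map (·.2) from rfl,
      pv_d2_items d th hnd,
      show d.values = d.items.map (·.2) from rfl, List.map_map, List.map_map]
  apply List.map_congr_left
  intro p _
  simp only [Function.comp]
  by_cases hc : (pvA_small d th).contains p.2
  · rw [if_pos hc, if_pos hc]
  · rw [if_neg hc, if_neg hc]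

-- the sweep is the fold of enumerate(bigList, nxt), and its final counter is nxt + |bigList|
theorem pv_sweep_eq (th : Int) :
    ∀ (n : Nat) (vals : List Int), vals.length ≤ n → ∀ (nxt : Int) (m : PySem.Dict Int Int),
      pvB_sweep th vals nxt m =
        ((PySem.List.enumerate (pvBigList th vals) nxt).foldl (fun mm p => mm.insert p.2 p.1) m,
         nxt + ((pvBigList th vals).length : Int)) := by
  intro n
  induction n with
  | zero =>
    intro vals h nxt m
    have hv : vals = [] := List.eq_nil_of_length_eq_zero (Nat.le_zero.mp h)
    subst hv
    simp [pvB_sweep, pvBigList, PySem.List.enumerate]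
  | succ n ih =>
    intro vals h nxt m
    cases vals with
    | nil => simp [pvB_sweep, pvBigList, PySem.List.enumerate]
    | cons v rest =>
      have hlen : (rest.dropWhile (fun x => x == v)).length ≤ n := by
        have h1 := List.length_dropWhile_le (fun x => x == v) rest
        simp only [List.length_cons] at h
        omega
      rw [pvB_sweep, pvBigList]
      by_cases hth : th ≤ (1 + ((rest.takeWhile (fun x => x == v)).length : Int))
      · rw [if_pos hth, if_pos hth, ih _ hlen, PySem.List.enumerate_cons]
        simp only [List.foldl_cons, List.length_cons, Prod.mk.injEq]
        refine ⟨trivial, ?_⟩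
        push_cast; ring
      · rw [if_neg hth, if_neg hth, ih _ hlen]

-- run/tail decomposition facts for a sorted (Pairwise ≤) cons
theorem pv_run_facts (v : Int) (rest : List Int) (hp : (v :: rest).Pairwise (· ≤ ·)) :
    (∀ x ∈ rest.dropWhile (fun x => x == v), v < x) ∧
    (rest.dropWhile (fun x => x == v)).Pairwise (· ≤ ·) ∧
    (((v :: rest).count v : Int) = 1 + ((rest.takeWhile (fun x => x == v)).length : Int)) ∧
    (∀ c, c ≠ v → (v :: rest).count c = (rest.dropWhile (fun x => x == v)).count c) := by
  rw [List.pairwise_cons] at hp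
  obtain ⟨hvle, hrest⟩ := hp
  have hsub : (rest.dropWhile (fun x => x == v)).Sublist rest := List.dropWhile_sublist _
  have htp : (rest.dropWhile (fun x => x == v)).Pairwise (· ≤ ·) := hrest.sublist hsub
  have hrun : ∀ x ∈ rest.takeWhile (fun x => x == v), x = v := by
    intro x hx
    have := List.mem_takeWhile_imp hx
    simpa using this
  have hgt : ∀ x ∈ rest.dropWhile (fun x => x == v), v < x := by
    intro x hx
    cases htl : rest.dropWhile (fun x => x == v) with
    | nil => rw [htl] at hx; cases hx
    | cons t0 ts =>
      have hne' : rest.dropWhile (fun x => x == v) ≠ [] := by rw [htl]; simp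
      have h0 : ¬ (t0 == v) = true := by
        have h1 := List.head_dropWhile_not (fun x => x == v) hne'
        simp [htl] at h1
        simpa using h1
      have ht0v : t0 ≠ v := by simpa using h0
      have ht0mem : t0 ∈ rest := hsub.mem (by rw [htl]; exact List.mem_cons_self)
      have hvt0 : v < t0 := lt_of_le_of_ne (hvle t0 ht0mem) (Ne.symm ht0v)
      rw [htl] at hx
      rcases List.mem_cons.mp hx with rfl | hx'
      · exact hvt0
      · have : t0 ≤ x := by
          have hpw := htp
          rw [htl, List.pairwise_cons] at hpw
          exact hpw.1 x hx'
        omega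
  refine ⟨hgt, htp, ?_, ?_⟩
  · have hsplit : rest = rest.takeWhile (fun x => x == v) ++ rest.dropWhile (fun x => x == v) :=
      (List.takeWhile_append_dropWhile).symm
    have hc1 : (rest.takeWhile (fun x => x == v)).count v = (rest.takeWhile (fun x => x == v)).length :=
      List.count_eq_length.mpr (fun b hb => (hrun b hb).symm)
    have hc2 : (rest.dropWhile (fun x => x == v)).count v = 0 :=
      List.count_eq_zero.mpr (fun hmem => lt_irrefl v (hgt v hmem))
    rw [List.count_cons_self]
    conv_lhs => rw [hsplit]
    rw [List.count_append, hc1, hc2]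
    push_cast; ring
  · intro c hc
    have hsplit : rest = rest.takeWhile (fun x => x == v) ++ rest.dropWhile (fun x => x == v) :=
      (List.takeWhile_append_dropWhile).symm
    have hc1 : (rest.takeWhile (fun x => x == v)).count c = 0 :=
      List.count_eq_zero.mpr (fun hmem => hc (hrun c hmem))
    have hcc : (v :: rest).count c = rest.count c := by
      simp [List.count_cons, hc, Ne.symm hc]
    rw [hcc]
    conv_lhs => rw [hsplit]
    rw [List.count_append, hc1]
    omega

theorem pv_bigList_mem (th : Int) :
    ∀ (n : Nat) (vals : List Int), vals.length ≤ n → vals.Pairwise (· ≤ ·) →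
      ∀ c, c ∈ pvBigList th vals ↔ c ∈ vals ∧ th ≤ (vals.count c : Int) := by
  intro n
  induction n with
  | zero =>
    intro vals h _ c
    have hv : vals = [] := List.eq_nil_of_length_eq_zero (Nat.le_zero.mp h)
    subst hv
    simp [pvBigList]
  | succ n ih =>
    intro vals h hp c
    cases vals with
    | nil => simp [pvBigList]
    | cons v rest =>
      obtain ⟨hgt, htp, hcnt, hcne⟩ := pv_run_facts v rest hp
      have hlen : (rest.dropWhile (fun x => x == v)).length ≤ n := by
        have h1 := List.length_dropWhile_le (fun x => x == v) rest
        simp only [List.length_cons] at h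
        omega
      have hih := ih _ hlen htp
      have hvnotail : v ∉ rest.dropWhile (fun x => x == v) :=
        fun hmem => lt_irrefl v (hgt v hmem)
      have hmemsplit : ∀ x, x ∈ (v :: rest) ↔ x = v ∨ x ∈ rest.dropWhile (fun x => x == v) := by
        intro x
        constructor
        · intro hx
          rcases List.mem_cons.mp hx with rfl | hx'
          · exact Or.inl rfl
          · conv at hx' => rw [← List.takeWhile_append_dropWhile (p := fun x => x == v) (l := rest)]
            rcases List.mem_append.mp hx' with hx1 | hx2
            · exact Or.inl (by simpa using List.mem_takeWhile_imp hx1)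
            · exact Or.inr hx2
        · rintro (rfl | hx)
          · exact List.mem_cons_self
          · exact List.mem_cons_of_mem _ ((List.dropWhile_sublist _).mem hx)
      rw [pvBigList]
      by_cases hth : th ≤ (1 + ((rest.takeWhile (fun x => x == v)).length : Int))
      · rw [if_pos hth]
        by_cases hcv : c = v
        · subst hcv
          constructor
          · intro _; exact ⟨List.mem_cons_self, by rw [hcnt]; exact hth⟩
          · intro _; exact List.mem_cons_self
        · have h1 : (c ∈ v :: pvBigList th (rest.dropWhile (fun x => x == v))) ↔
              c ∈ pvBigList th (rest.dropWhile (fun x => x == v)) := by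
            simp [hcv]
          rw [h1, hih c]
          rw [hmemsplit c]
          have : ((v :: rest).count c : Int) = ((rest.dropWhile (fun x => x == v)).count c : Int) := by
            rw [hcne c hcv]
          rw [this]
          constructor
          · rintro ⟨hm, hcc⟩; exact ⟨Or.inr hm, hcc⟩
          · rintro ⟨rfl | hm, hcc⟩
            · exact absurd rfl hcv
            · exact ⟨hm, hcc⟩
      · rw [if_neg hth]
        by_cases hcv : c = v
        · subst hcv
          rw [hih c]
          constructor
          · rintro ⟨hm, _⟩; exact absurd hm hvnotail
          · rintro ⟨_, hcc⟩
            rw [hcnt] at hcc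
            exact absurd hcc hth
        · rw [hih c, hmemsplit c]
          have : ((v :: rest).count c : Int) = ((rest.dropWhile (fun x => x == v)).count c : Int) := by
            rw [hcne c hcv]
          rw [this]
          constructor
          · rintro ⟨hm, hcc⟩; exact ⟨Or.inr hm, hcc⟩
          · rintro ⟨rfl | hm, hcc⟩
            · exact absurd rfl hcv
            · exact ⟨hm, hcc⟩

theorem pv_bigList_lt (th : Int) :
    ∀ (n : Nat) (vals : List Int), vals.length ≤ n → vals.Pairwise (· ≤ ·) →
      (pvBigList th vals).Pairwise (· < ·) := by
  intro n
  induction n with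
  | zero =>
    intro vals h _
    have hv : vals = [] := List.eq_nil_of_length_eq_zero (Nat.le_zero.mp h)
    subst hv
    simp [pvBigList]
  | succ n ih =>
    intro vals h hp
    cases vals with
    | nil => simp [pvBigList]
    | cons v rest =>
      obtain ⟨hgt, htp, _, _⟩ := pv_run_facts v rest hp
      have hlen : (rest.dropWhile (fun x => x == v)).length ≤ n := by
        have h1 := List.length_dropWhile_le (fun x => x == v) rest
        simp only [List.length_cons] at h
        omega
      have hihlt := ih _ hlen htp
      rw [pvBigList]
      by_cases hth : th ≤ (1 + ((rest.takeWhile (fun x => x == v)).length : Int))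
      · rw [if_pos hth]
        rw [List.pairwise_cons]
        refine ⟨?_, hihlt⟩
        intro y hy
        have hym : y ∈ rest.dropWhile (fun x => x == v) :=
          ((pv_bigList_mem th _ _ le_rfl htp y).mp hy).1
        exact hgt y hym
      · rw [if_neg hth]; exact hihlt

theorem pv_last_ge (l : List Int) (hp : l.Pairwise (· ≤ ·)) (h : l ≠ []) :
    ∀ y ∈ l, y ≤ l.getLast h := by
  induction l with
  | nil => exact absurd rfl h
  | cons a t ih =>
    intro y hy
    rw [List.pairwise_cons] at hp
    cases t with
    | nil =>
      rcases List.mem_cons.mp hy with rfl | hy'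
      · simp [List.getLast]
      · cases hy'
    | cons b ts =>
      rw [List.getLast_cons (by simp)]
      rcases List.mem_cons.mp hy with rfl | hy'
      · calc y ≤ (b :: ts).getLast (by simp) :=
              hp.1 _ (List.getLast_mem (by simp))
          _ = (b :: ts).getLast (by simp) := rfl
      · exact ih hp.2 (by simp) y hy'

-- fold of (label, key) pairs into a dict: lookup facts
theorem pv_foldpairs_get?_notmem (L : List (Int × Int)) (base : PySem.Dict Int Int) (k : Int)
    (h : k ∉ L.map (·.2)) :
    (L.foldl (fun mm p => mm.insert p.2 p.1) base).get? k = base.get? k := by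
  induction L generalizing base with
  | nil => rfl
  | cons p t ih =>
    simp only [List.map_cons, List.mem_cons, not_or] at h
    simp only [List.foldl_cons]
    rw [ih _ h.2, PySem.Dict.get?_insert_of_ne _ _ h.1]

theorem pv_foldpairs_contains_mono (L : List (Int × Int)) (base : PySem.Dict Int Int) (k : Int)
    (h : base.contains k = true) :
    (L.foldl (fun mm p => mm.insert p.2 p.1) base).contains k = true := by
  induction L generalizing base with
  | nil => exact h
  | cons p t ih =>
    simp only [List.foldl_cons]
    apply ih
    rw [PySem.Dict.contains_insert, h]
    simp

theorem pv_foldpairs_get?_ne_none (L : List (Int × Int)) (base : PySem.Dict Int Int) (k : Int)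
    (h : k ∈ L.map (·.2)) :
    (L.foldl (fun mm p => mm.insert p.2 p.1) base).get? k ≠ none := by
  intro h0
  have hiff := PySem.Dict.get?_eq_none_iff_not_mem_keys
    (d := L.foldl (fun mm p => mm.insert p.2 p.1) base) (k := k)
  have hmem : k ∉ (L.foldl (fun mm p => mm.insert p.2 p.1) base).keys := hiff.mp h0
  have hcont : (L.foldl (fun mm p => mm.insert p.2 p.1) base).contains k = true := by
    obtain ⟨p, hpL, hpk⟩ := List.mem_map.mp h
    obtain ⟨L1, L2, rfl⟩ := List.append_of_mem hpL
    rw [List.foldl_append, List.foldl_cons]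
    apply pv_foldpairs_contains_mono
    rw [PySem.Dict.contains_insert]
    simp [hpk]
  rw [PySem.Dict.contains_iff_mem_keys] at hcont
  exact hmem hcont

-- ===== VERDICT (by name: the statement is the Claim_ definition above) =====
theorem merge_small_communities_spec : Claim_equal_merge_small_communities := by
  intro partition threshold _ hpre
  unfold Spec_merge_small_communities
  simp only [merge_small_communities, merge_small_communities_alt]
  set th := threshold with hth
  set d := PySem.Dict.ofList partition with hd
  have hnd : d.keys.Nodup := PySem.Dict.nodup_keys_ofList _
  have hne : d.values ≠ [] := pv_vals_ne partition hpre
  set svals := PySem.List.sorted d.values (fun x => x) false with hsv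
  have hsp : svals.Pairwise (· ≤ ·) := PySem.List.sorted_pairwise _ _
  have hperm : svals.Perm d.values := PySem.List.sorted_perm _ _ _
  have hsvne : svals ≠ [] := by
    intro h0
    exact hne (List.Perm.eq_nil ((h0 ▸ hperm : List.Perm ([] : List Int) d.values).symm))
  have hbmem : ∀ c, c ∈ pvBigList th svals ↔ c ∈ d.values ∧ th ≤ (d.values.count c : Int) := by
    intro c
    rw [pv_bigList_mem th svals.length svals le_rfl hsp c, hperm.mem_iff, hperm.count_eq]
  have hblt : (pvBigList th svals).Pairwise (· < ·) :=
    pv_bigList_lt th svals.length svals le_rfl hsp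
  have hbnodup : (pvBigList th svals).Nodup := hblt.imp (fun h => ne_of_lt h)
  have hltnew := pv_lt_newId d hne
  -- the fresh id equality: last of the sorted values is max(values)
  have hnew : (PySem.List.pyGet? svals (-1)).getD 0 + 1 = pvA_newId d := by
    have hlast : PySem.List.pyGet? svals (-1) = svals.getLast? := PySem.List.pyGet?_neg_one svals
    have hlast2 : svals.getLast? = some (svals.getLast hsvne) := List.getLast?_eq_some_getLast hsvne
    cases hmax : PySem.List.max? d.values (fun x => x) with
    | none =>
      cases hv : d.values with
      | nil => exact absurd hv hne
      | cons a t' =>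
        rw [hv, PySem.List.max?_id_cons] at hmax
        cases hmax
    | some mx =>
      have hmxmem : mx ∈ d.values := PySem.List.max?_mem hmax
      have h1 : svals.getLast hsvne ∈ d.values := hperm.mem_iff.mp (List.getLast_mem hsvne)
      have h2 : svals.getLast hsvne ≤ mx := PySem.List.max?_isMax hmax _ h1
      have h3 : mx ≤ svals.getLast hsvne := pv_last_ge svals hsp hsvne mx (hperm.mem_iff.mpr hmxmem)
      simp only [pvA_newId, hmax, hlast, hlast2, Option.getD_some]
      omega
  have hsw := pv_sweep_eq th svals.length svals le_rfl 1 PySem.Dict.empty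
  rw [hsw]
  have hsnd : (PySem.List.enumerate (pvBigList th svals) 1).map (·.2) = pvBigList th svals :=
    PySem.List.map_snd_enumerate _ _
  have hmemc : ∀ (l : List Int) (a : Int), l.contains a = true ↔ a ∈ l := by
    intro l a; simp
  have hca : ∀ w : Int, (pvA_small d th).contains w = true ↔
      (w ∈ d.values ∧ (d.values.count w : Int) < th) := by
    intro w
    rw [hmemc]
    constructor
    · intro hw
      obtain ⟨h1, h2⟩ := (pv_smallA_mem d th w).mp hw
      exact ⟨h1, by exact_mod_cast h2⟩
    · intro ⟨h1, h2⟩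
      exact (pv_smallA_mem d th w).mpr ⟨h1, by exact_mod_cast h2⟩
  -- B's label dict
  have hEget_some : ∀ c ∈ pvBigList th svals,
      ((PySem.List.enumerate (pvBigList th svals) 1).foldl
        (fun mm p => mm.insert p.2 p.1) PySem.Dict.empty).get? c ≠ none := by
    intro c hc
    exact pv_foldpairs_get?_ne_none _ _ c (by rw [hsnd]; exact hc)
  have hEget_none : ∀ c, c ∉ pvBigList th svals →
      ((PySem.List.enumerate (pvBigList th svals) 1).foldl
        (fun mm p => mm.insert p.2 p.1) PySem.Dict.empty).get? c = none := by
    intro c hc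
    rw [pv_foldpairs_get?_notmem _ _ c (by rw [hsnd]; exact hc)]
    rfl
  -- A's sorted surviving communities
  by_cases hsm : ∃ c ∈ d.values, (d.values.count c : Int) < th
  · -- some community is small: the merged id survives
    obtain ⟨c0, hc0v, hc0cnt⟩ := hsm
    have huniq : pvA_unique d th = pvBigList th svals ++ [pvA_newId d] := by
      simp only [pvA_unique]
      rw [pv_d2_values d th hnd]
      apply PySem.List.sorted_eq_of_perm_of_pairwise_lt
      · apply (List.perm_ext_iff_of_nodup ?_ (PySem.Set.nodup_ofList _)).mpr
        · intro a
          rw [List.mem_append, List.mem_singleton, PySem.Set.mem_ofList, List.mem_map]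
          constructor
          · rintro (ha | rfl)
            · obtain ⟨hav, hcnt⟩ := (hbmem a).mp ha
              refine ⟨a, hav, ?_⟩
              have hb : (pvA_small d th).contains a = false := by
                cases hb : (pvA_small d th).contains a
                · rfl
                · have := ((hca a).mp hb).2
                  omega
              rw [if_neg (by rw [hb]; simp)]
            · refine ⟨c0, hc0v, ?_⟩
              have hb : (pvA_small d th).contains c0 = true := (hca c0).mpr ⟨hc0v, hc0cnt⟩
              rw [if_pos hb]
          · rintro ⟨w, hwv, rfl⟩
            by_cases hb : (pvA_small d th).contains w
            · right; rw [if_pos hb]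
            · left
              have hnb : (pvA_small d th).contains w = false := Bool.eq_false_iff.mpr hb
              have hcnt : ¬ ((d.values.count w : Int) < th) := fun hlt => hb ((hca w).mpr ⟨hwv, hlt⟩)
              simp only [hnb, Bool.false_eq_true, if_false]
              exact (hbmem w).mpr ⟨hwv, by omega⟩
        · rw [List.nodup_append]
          refine ⟨hbnodup, List.nodup_singleton _, ?_⟩
          intro a ha b hbmem'
          rw [List.mem_singleton] at hbmem'
          subst hbmem'
          intro heq
          have := hltnew a ((hbmem a).mp (heq ▸ ha)).1
          rw [heq] at this
          have := hltnew a ((hbmem a).mp ha).1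
          omega
      · rw [List.pairwise_append]
        refine ⟨hblt, List.pairwise_singleton _ _, ?_⟩
        intro a ha b hb'
        rw [List.mem_singleton] at hb'
        subst hb'
        exact hltnew a ((hbmem a).mp ha).1
    have hmap : pvA_mapping d th =
        ((PySem.List.enumerate (pvBigList th svals) 1).foldl
          (fun mm p => mm.insert p.2 p.1) PySem.Dict.empty).insert (pvA_newId d)
          (1 + ((pvBigList th svals).length : Int)) := by
      simp only [pvA_mapping]
      rw [huniq, PySem.List.enumerate_append, List.foldl_append,
          PySem.List.enumerate_cons, PySem.List.enumerate_nil]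
      simp only [List.foldl_cons, List.foldl_nil]
    simp only [Prod.mk.injEq]
    refine ⟨?_, hnew.symm⟩
    rw [pv_d2_items d th hnd, List.foldl_map]
    refine congrArg PySem.Dict.items (PySem.List.foldl_congr_mem _ _ _ _ ?_)
    intro acc p hp
    have hpv : p.2 ∈ d.values := List.mem_map_of_mem (f := (·.2)) hp
    by_cases hb : th ≤ (d.values.count p.2 : Int)
    · have hnb : (pvA_small d th).contains p.2 = false := by
        cases hcontr : (pvA_small d th).contains p.2
        · rfl
        · have := ((hca p.2).mp hcontr).2
          omega
      simp only [hnb, Bool.false_eq_true, if_false]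
      have hmemb : p.2 ∈ pvBigList th svals := (hbmem p.2).mpr ⟨hpv, hb⟩
      obtain ⟨r, hr⟩ := Option.ne_none_iff_exists'.mp (hEget_some p.2 hmemb)
      have hget : (pvA_mapping d th).get? p.2 = some r := by
        rw [hmap, PySem.Dict.get?_insert_of_ne _ _ (by
          intro heq
          have := hltnew p.2 hpv
          rw [heq] at this
          omega)]
        exact hr
      rw [PySem.Dict.getD_eq_get?_getD, PySem.Dict.getD_eq_get?_getD, hget, hr]
      rfl
    · have hyb : (pvA_small d th).contains p.2 = true := (hca p.2).mpr ⟨hpv, by omega⟩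
      simp only [hyb, if_true]
      have hnotb : p.2 ∉ pvBigList th svals := fun hmem => hb ((hbmem p.2).mp hmem).2
      rw [PySem.Dict.getD_eq_get?_getD, PySem.Dict.getD_eq_get?_getD,
          hEget_none p.2 hnotb, hmap, PySem.Dict.get?_insert_self]
      rfl
  · -- no small community: no value is rewritten and the fresh id does not survive
    have hnos : ∀ c ∈ d.values, th ≤ (d.values.count c : Int) := by
      intro c hc
      by_contra hlt
      exact hsm ⟨c, hc, by omega⟩
    have huniq : pvA_unique d th = pvBigList th svals := by
      simp only [pvA_unique]
      rw [pv_d2_values d th hnd]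
      apply PySem.List.sorted_eq_of_perm_of_pairwise_lt
      · apply (List.perm_ext_iff_of_nodup hbnodup (PySem.Set.nodup_ofList _)).mpr
        intro a
        rw [PySem.Set.mem_ofList, List.mem_map]
        constructor
        · intro ha
          obtain ⟨hav, _⟩ := (hbmem a).mp ha
          refine ⟨a, hav, ?_⟩
          have hb : (pvA_small d th).contains a = false := by
            cases hb : (pvA_small d th).contains a
            · rfl
            · have h2 := ((hca a).mp hb).2
              have := hnos a ((hca a).mp hb).1
              omega
          rw [if_neg (by rw [hb]; simp)]
        · rintro ⟨w, hwv, rfl⟩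
          have hb : (pvA_small d th).contains w = false := by
            cases hb : (pvA_small d th).contains w
            · rfl
            · have h2 := ((hca w).mp hb).2
              have := hnos w hwv
              omega
          simp only [hb, if_false]
          exact (hbmem w).mpr ⟨hwv, hnos w hwv⟩
      · exact hblt
    have hmap : pvA_mapping d th =
        (PySem.List.enumerate (pvBigList th svals) 1).foldl
          (fun mm p => mm.insert p.2 p.1) PySem.Dict.empty := by
      simp only [pvA_mapping]
      rw [huniq]
    simp only [Prod.mk.injEq]
    refine ⟨?_, hnew.symm⟩
    rw [pv_d2_items d th hnd, List.foldl_map]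
    refine congrArg PySem.Dict.items (PySem.List.foldl_congr_mem _ _ _ _ ?_)
    intro acc p hp
    have hpv : p.2 ∈ d.values := List.mem_map_of_mem (f := (·.2)) hp
    have hnb : (pvA_small d th).contains p.2 = false := by
      cases hcontr : (pvA_small d th).contains p.2
      · rfl
      · have h2 := ((hca p.2).mp hcontr).2
        have := hnos p.2 hpv
        omega
    simp only [hnb, Bool.false_eq_true, if_false]
    have hmemb : p.2 ∈ pvBigList th svals := (hbmem p.2).mpr ⟨hpv, hnos p.2 hpv⟩
    obtain ⟨r, hr⟩ := Option.ne_none_iff_exists'.mp (hEget_some p.2 hmemb)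
    have hget : (pvA_mapping d th).get? p.2 = some r := by
      rw [hmap]; exact hr
    rw [PySem.Dict.getD_eq_get?_getD, PySem.Dict.getD_eq_get?_getD, hget, hr]
    rfl
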